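-- pv_equiv track=rewrite | github.com/mcyph/char_data | char_data/data_sources/external/ReformattedData.py | __filter_to_only
-- ===== SOURCE A (Python) =====
-- def __filter_to_only(L, LUseOnly):
--     LOut = []
--
--     cur_block_item = None
--     use_chars = False
--
--     for item in L:
--         if item[0] == 'block':
--             cur_block_item = item
--
--             if cur_block_item[1][0] in LUseOnly:
--                 LOut.append(cur_block_item)
--                 use_chars = True
--             else:
--                 use_chars = False
--
--         elif item[0] == 'sub_block':
--             assert cur_block_item
--
--             if use_chars:
--                 LOut.append(item)
--
--         elif item[0] == 'chars':
--             if use_chars: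
--                 LOut.append(item)
--
--         else:
--             raise Exception("Unknown value type: %s" % item[0])
--
--     return LOut
-- ===== SOURCE B (Python) =====
-- def __filter_to_only(L, LUseOnly):
--     # Pass 1: segment L into groups; each 'block' opens a group, sub_block/chars join the open group.
--     groups = []
--     for item in L:
--         tag = item[0]
--         if tag == 'block':
--             groups.append([item])
--         elif tag == 'sub_block':
--             assert groups
--             groups[-1].append(item)
--         elif tag == 'chars':
--             if groups:
--                 groups[-1].append(item)
--         else:
--             raise Exception("Unknown value type: %s" % tag)
--     # Pass 2: keep whole groups whose block key is selected.
--     LOut = []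
--     for g in groups:
--         if g[0][1][0] in LUseOnly:
--             LOut.extend(g)
--     return LOut
-- ===== Notes on version B (the rewrite author's own statement) =====
-- stated objective: alternative
-- what changed: B replaces A's stateful single pass (cur_block_item/use_chars flags) by two passes: first segment the list into per-block groups, then keep whole groups whose block key is in LUseOnly.
import Mathlib
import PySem

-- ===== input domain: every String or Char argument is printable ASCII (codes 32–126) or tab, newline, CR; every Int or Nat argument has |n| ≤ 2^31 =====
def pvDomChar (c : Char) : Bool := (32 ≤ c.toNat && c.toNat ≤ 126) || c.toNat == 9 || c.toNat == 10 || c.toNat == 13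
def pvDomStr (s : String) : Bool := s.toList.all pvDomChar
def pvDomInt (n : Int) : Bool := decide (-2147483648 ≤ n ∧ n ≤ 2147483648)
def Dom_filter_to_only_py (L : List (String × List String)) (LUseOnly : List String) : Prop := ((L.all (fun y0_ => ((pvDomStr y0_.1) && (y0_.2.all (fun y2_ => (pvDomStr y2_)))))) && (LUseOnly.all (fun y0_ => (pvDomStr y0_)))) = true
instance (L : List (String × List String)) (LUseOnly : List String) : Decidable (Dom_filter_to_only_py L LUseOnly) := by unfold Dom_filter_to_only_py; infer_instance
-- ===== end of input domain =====

-- B restructures A's stateful single pass into group-then-flatten (two passes); same output, objective: alternative decomposition.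

-- ===== PORT A =====
-- state = (LOut, cur_block_item, use_chars); item[1][0] ported as headD "" (Python raises
-- IndexError on an empty key list there — such inputs are excluded by Pre_).
def filter_to_only_py (L : List (String × List String)) (LUseOnly : List String) : List (String × List String) :=
  (L.foldl (fun (st : List (String × List String) × Option (String × List String) × Bool) item =>
      if item.1 == "block" then
        if LUseOnly.contains (item.2.headD "") then (st.1 ++ [item], some item, true)
        else (st.1, some item, false)
      else if item.1 == "sub_block" then
        -- 'assert cur_block_item' raises when st.2.1 = none: excluded by Pre_
        if st.2.2 then (st.1 ++ [item], st.2.1, st.2.2) else st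
      else if item.1 == "chars" then
        if st.2.2 then (st.1 ++ [item], st.2.1, st.2.2) else st
      else st  -- 'raise Exception(...)': excluded by Pre_
    ) ([], none, false)).1

-- ===== PORT B =====
-- groups[-1].append(item)  (on groups = [] Python's assert raised already: excluded by Pre_)
def pvAppendLast (gs : List (List (String × List String))) (x : String × List String) : List (List (String × List String)) :=
  match gs with
  | [] => []
  | _ => gs.dropLast ++ [gs.getLastD [] ++ [x]]

-- g[0][1][0] in LUseOnly, ported with headD (groups are nonempty and start with a block item;
-- an empty key list raises IndexError in Python: excluded by Pre_)
def pvKeyIn (LUseOnly : List String) (g : List (String × List String)) : Bool :=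
  LUseOnly.contains ((g.headD ("", [])).2.headD "")

def filter_to_only_py_alt (L : List (String × List String)) (LUseOnly : List String) : List (String × List String) :=
  let groups := L.foldl (fun (gs : List (List (String × List String))) item =>
      if item.1 == "block" then gs ++ [[item]]
      else if item.1 == "sub_block" then pvAppendLast gs item
      else if item.1 == "chars" then
        if gs.isEmpty then gs else pvAppendLast gs item
      else gs) []
  groups.foldl (fun out g => if pvKeyIn LUseOnly g then out ++ g else out) []

-- ===== PRECONDITION & SPEC =====
-- Pre_ excludes exactly the inputs on which Python A raises: an unknown tag (Exception),
-- a 'block' item with an empty key list (IndexError on item[1][0]), or a 'sub_block'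
-- before the first 'block' (AssertionError).
def Pre_filter_to_only_py (L : List (String × List String)) (LUseOnly : List String) : Prop :=
  (∀ item ∈ L, item.1 = "block" ∨ item.1 = "sub_block" ∨ item.1 = "chars") ∧
  (∀ item ∈ L, item.1 = "block" → item.2 ≠ []) ∧
  (∀ item ∈ L.takeWhile (fun it => it.1 ≠ "block"), item.1 ≠ "sub_block")
instance (L : List (String × List String)) (LUseOnly : List String) : Decidable (Pre_filter_to_only_py L LUseOnly) := by unfold Pre_filter_to_only_py; infer_instance

def pvWitness_filter_to_only_py : (List (String × List String)) × List String :=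
  ([("chars", ["z"]), ("block", ["b1", "x"]), ("chars", ["q"]), ("sub_block", ["s"]), ("block", ["b2"]), ("chars", ["r"])], ["b1"])

def Spec_filter_to_only_py (L : List (String × List String)) (LUseOnly : List String) (out : List (String × List String)) : Prop := out = filter_to_only_py_alt L LUseOnly
instance (L : List (String × List String)) (LUseOnly : List String) (out : List (String × List String)) : Decidable (Spec_filter_to_only_py L LUseOnly out) := by unfold Spec_filter_to_only_py; infer_instance

-- ===== CLAIM (what is proved, stated in full; the proofs are below) =====
def Claim_equal_filter_to_only_py : Prop := ∀ (L : List (String × List String)) (LUseOnly : List String), Dom_filter_to_only_py L LUseOnly → Pre_filter_to_only_py L LUseOnly → Spec_filter_to_only_py L LUseOnly (filter_to_only_py L LUseOnly)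

-- ===== LEMMAS AND PROOFS =====

-- B's second pass as a function, and the use_chars flag read off the group list.
def pvSel (LUseOnly : List String) (gs : List (List (String × List String))) : List (String × List String) :=
  gs.foldl (fun out g => if pvKeyIn LUseOnly g then out ++ g else out) []

def pvUseOf (LUseOnly : List String) (gs : List (List (String × List String))) : Bool :=
  match gs.getLast? with
  | none => false
  | some g => pvKeyIn LUseOnly g

lemma pvSel_snoc (LUseOnly : List String) (gs : List (List (String × List String))) (g : List (String × List String)) :
    pvSel LUseOnly (gs ++ [g]) = pvSel LUseOnly gs ++ (if pvKeyIn LUseOnly g then g else []) := by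
  simp [pvSel, List.foldl_append]
  split_ifs with h <;> simp [PySem.List.foldl_append_eq_flatten]

lemma pvKeyIn_snoc (LUseOnly : List String) (g : List (String × List String)) (x : String × List String) (h : g ≠ []) :
    pvKeyIn LUseOnly (g ++ [x]) = pvKeyIn LUseOnly g := by
  cases g with
  | nil => exact absurd rfl h
  | cons a t => simp [pvKeyIn]

-- The core invariant: running A's loop from a state that matches B's group list
-- yields the selection of B's final group list. (cur is irrelevant to the output.)
lemma pv_ne_snoc {gs : List (List (String × List String))} {g : List (String × List String)}
    (hne : ∀ x ∈ gs, x ≠ []) (hg : g ≠ []) : ∀ x ∈ gs ++ [g], x ≠ [] := by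
  intro x hx
  rcases List.mem_append.1 hx with h | h
  · exact hne x h
  · simp at h; subst h; exact hg

lemma pv_appendLast_facts (LUseOnly : List String) (item : String × List String)
    {gs : List (List (String × List String))} (h : gs ≠ []) (hne : ∀ g ∈ gs, g ≠ []) :
    pvSel LUseOnly (pvAppendLast gs item)
        = pvSel LUseOnly gs ++ (if pvUseOf LUseOnly gs then [item] else []) ∧
    pvUseOf LUseOnly (pvAppendLast gs item) = pvUseOf LUseOnly gs ∧
    (∀ g ∈ pvAppendLast gs item, g ≠ []) := by
  have happ0 : pvAppendLast gs item = gs.dropLast ++ [gs.getLastD [] ++ [item]] := by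
    cases gs with
    | nil => exact absurd rfl h
    | cons a t => rfl
  have hsome : gs.getLast? = some (gs.getLast h) := List.getLast?_eq_some_getLast h
  have hlastD : gs.getLastD [] = gs.getLast h := by rw [List.getLastD_eq_getLast?, hsome]; rfl
  have hgs_eq : gs.dropLast ++ [gs.getLast h] = gs := List.dropLast_concat_getLast h
  have hyne : gs.getLast h ≠ [] := hne _ (List.getLast_mem h)
  have happ : pvAppendLast gs item = gs.dropLast ++ [gs.getLast h ++ [item]] := by
    rw [happ0, hlastD]
  have hkey2 : pvKeyIn LUseOnly (gs.getLast h ++ [item]) = pvKeyIn LUseOnly (gs.getLast h) :=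
    pvKeyIn_snoc _ _ _ hyne
  have huse : pvUseOf LUseOnly gs = pvKeyIn LUseOnly (gs.getLast h) := by
    simp [pvUseOf, hsome]
  have hselgs : pvSel LUseOnly (gs.dropLast ++ [gs.getLast h]) = pvSel LUseOnly gs := by
    rw [hgs_eq]
  rw [pvSel_snoc] at hselgs
  refine ⟨?_, ?_, ?_⟩
  · rw [happ, pvSel_snoc, hkey2, huse, ← hselgs]
    by_cases hk : pvKeyIn LUseOnly (gs.getLast h) = true <;> simp [hk]
  · rw [happ, huse]
    simp [pvUseOf, hkey2]
  · rw [happ]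
    intro g hg
    rcases List.mem_append.1 hg with hg | hg
    · exact hne g (List.mem_of_mem_dropLast hg)
    · simp at hg; subst hg; simp
lemma pv_core (LUseOnly : List String) :
    ∀ (L : List (String × List String)) (gs : List (List (String × List String)))
      (cur : Option (String × List String)),
      (∀ g ∈ gs, g ≠ []) →
      (L.foldl (fun (st : List (String × List String) × Option (String × List String) × Bool) item =>
        if item.1 == "block" then
          if LUseOnly.contains (item.2.headD "") then (st.1 ++ [item], some item, true)
          else (st.1, some item, false)
        else if item.1 == "sub_block" then
          if st.2.2 then (st.1 ++ [item], st.2.1, st.2.2) else st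
        else if item.1 == "chars" then
          if st.2.2 then (st.1 ++ [item], st.2.1, st.2.2) else st
        else st) (pvSel LUseOnly gs, cur, pvUseOf LUseOnly gs)).1
      = pvSel LUseOnly (L.foldl (fun gs item =>
          if item.1 == "block" then gs ++ [[item]]
          else if item.1 == "sub_block" then pvAppendLast gs item
          else if item.1 == "chars" then
            if gs.isEmpty then gs else pvAppendLast gs item
          else gs) gs) := by
  intro L
  induction L with
  | nil => intro gs cur hne; rfl
  | cons item rest ih =>
    intro gs cur hne
    simp only [List.foldl_cons]
    by_cases hb : (item.1 == "block") = true
    · by_cases hm : LUseOnly.contains (item.2.headD "") = true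
      · have hkey : pvKeyIn LUseOnly [item] = true := by simpa [pvKeyIn] using hm
        have hne' : ∀ g ∈ gs ++ [[item]], g ≠ [] := pv_ne_snoc hne (by simp)
        have hthis := ih (gs ++ [[item]]) (some item) hne'
        have hsel' : pvSel LUseOnly (gs ++ [[item]]) = pvSel LUseOnly gs ++ [item] := by
          rw [pvSel_snoc, hkey]; simp
        have huse' : pvUseOf LUseOnly (gs ++ [[item]]) = true := by simp [pvUseOf, hkey]
        rw [hsel', huse'] at hthis
        simp only [if_pos hb, if_pos hm]
        exact hthis
      · have hkey : pvKeyIn LUseOnly [item] = false := by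
          simp [pvKeyIn]; exact fun h => hm (by simpa using h)
        have hne' : ∀ g ∈ gs ++ [[item]], g ≠ [] := pv_ne_snoc hne (by simp)
        have hthis := ih (gs ++ [[item]]) (some item) hne'
        have hsel' : pvSel LUseOnly (gs ++ [[item]]) = pvSel LUseOnly gs := by
          rw [pvSel_snoc, hkey]; simp
        have huse' : pvUseOf LUseOnly (gs ++ [[item]]) = false := by simp [pvUseOf, hkey]
        rw [hsel', huse'] at hthis
        simp only [if_pos hb, if_neg hm]
        exact hthis
    · by_cases hs : (item.1 == "sub_block") = true
      · simp only [if_neg hb, if_pos hs]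
        cases gs with
        | nil =>
          have hu : pvUseOf LUseOnly ([] : List (List (String × List String))) = false := rfl
          rw [hu]
          simp only [Bool.false_eq_true, if_false, pvAppendLast]
          exact ih [] cur (by intro g hg; simp at hg)
        | cons a t =>
          obtain ⟨hsel, huse, hne'⟩ := pv_appendLast_facts LUseOnly item (gs := a :: t) (by simp) hne
          have hthis := ih (pvAppendLast (a :: t) item) cur hne'
          rw [hsel, huse] at hthis
          by_cases hu : pvUseOf LUseOnly (a :: t) = true
          · rw [hu] at hthis ⊢
            simp only [if_true] at hthis ⊢
            exact hthis
          · rw [Bool.not_eq_true] at hu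
            rw [hu] at hthis ⊢
            simp only [Bool.false_eq_true, if_false, List.append_nil] at hthis ⊢
            exact hthis
      · by_cases hc : (item.1 == "chars") = true
        · simp only [if_neg hb, if_neg hs, if_pos hc]
          cases gs with
          | nil =>
            have hu : pvUseOf LUseOnly ([] : List (List (String × List String))) = false := rfl
            rw [hu]
            simp only [Bool.false_eq_true, if_false, List.isEmpty_nil, if_true]
            exact ih [] cur (by intro g hg; simp at hg)
          | cons a t =>
            obtain ⟨hsel, huse, hne'⟩ := pv_appendLast_facts LUseOnly item (gs := a :: t) (by simp) hne
            have hthis := ih (pvAppendLast (a :: t) item) cur hne'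
            rw [hsel, huse] at hthis
            simp only [List.isEmpty_cons, Bool.false_eq_true, if_false]
            by_cases hu : pvUseOf LUseOnly (a :: t) = true
            · rw [hu] at hthis ⊢
              simp only [if_true] at hthis ⊢
              exact hthis
            · rw [Bool.not_eq_true] at hu
              rw [hu] at hthis ⊢
              simp only [Bool.false_eq_true, if_false, List.append_nil] at hthis ⊢
              exact hthis
        · simp only [if_neg hb, if_neg hs, if_neg hc]
          exact ih gs cur hne

-- ===== VERDICT (by name: the statement is the Claim_ definition above) =====
theorem filter_to_only_py_spec : Claim_equal_filter_to_only_py := by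
  intro L LUseOnly _ _
  unfold Spec_filter_to_only_py filter_to_only_py filter_to_only_py_alt
  simpa [pvSel, pvUseOf] using pv_core LUseOnly L [] none (by intro g hg; simp at hg)
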